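-- pv_equiv track=rewrite | github.com/diegobrnrd/Travelling-Salesman-Problem | brute-force/bf.py | gerar_rotas
-- ===== SOURCE A (Python) =====
-- def gerar_rotas(lista):
--     """Gera todas as combinações possíveis de rotas."""
--     if len(lista) == 0:
--         return []
--     if len(lista) == 1:
--         return [lista + [lista[0]]]
--
--     permutacoes = []
--     for i in range(len(lista)):
--         elemento = lista[i]
--         restante = lista[:i] + lista[i + 1:]
--         for p in gerar_rotas(restante):
--             permutacoes.append([elemento] + p[:-1] + [elemento])
--
--     return permutacoes
-- ===== SOURCE B (Python) =====
-- def gerar_rotas(lista):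
--     """Gera todas as combinacoes possiveis de rotas (iterative prefix expansion)."""
--     if len(lista) == 0:
--         return []
--     states = [([], lista)]  # (chosen prefix, remaining elements in original order)
--     for _ in range(len(lista)):
--         states = [(prefix + [x], rest[:j] + rest[j + 1:])
--                   for prefix, rest in states
--                   for j, x in enumerate(rest)]
--     return [prefix + [prefix[0]] for prefix, _ in states]
-- ===== Notes on version B (the rewrite author's own statement) =====
-- stated objective: alternative
-- what changed: Replaced A's per-position recursion (which rebuilds each closed route by stripping and re-adding the endpoint at every level) with an iterative breadth-first worklist that grows (prefix, remaining) states level by level and closes each full permutation once at the end.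
import Mathlib
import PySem

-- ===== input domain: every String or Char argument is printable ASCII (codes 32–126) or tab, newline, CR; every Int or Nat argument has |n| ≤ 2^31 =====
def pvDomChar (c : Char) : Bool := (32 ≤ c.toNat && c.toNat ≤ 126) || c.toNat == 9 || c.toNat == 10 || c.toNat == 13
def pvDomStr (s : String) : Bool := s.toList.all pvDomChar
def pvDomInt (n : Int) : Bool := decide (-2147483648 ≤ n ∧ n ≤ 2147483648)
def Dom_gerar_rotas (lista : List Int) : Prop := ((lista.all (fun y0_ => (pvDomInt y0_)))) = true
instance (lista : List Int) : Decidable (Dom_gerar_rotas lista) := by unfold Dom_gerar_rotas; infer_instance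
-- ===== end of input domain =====

-- B replaces A's recursive per-position route construction with an iterative worklist of
-- (prefix, remaining) states; same output, same order (objective: alternative decomposition).

-- ===== PORT A =====
-- fuel = lista.length only makes A's structural recursion total in Lean; each recursive call
-- removes exactly one element, so the fuel is never exhausted on the branch that recurses.
-- pyGetD is used where the Python index is provably in range (i from range(len(lista)), lista[0] on len 1).
def gerarRotasFuel : Nat → List Int → List (List Int)
  | 0, _ => []
  | fuel+1, lista =>
    if lista.length = 0 then []
    else if lista.length = 1 then [lista ++ [PySem.List.pyGetD lista 0 0]]
    else
      (PySem.List.pyRange 0 (lista.length : Int) 1).foldl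
        (fun permutacoes i =>
          let elemento := PySem.List.pyGetD lista i 0
          let restante := PySem.List.slice lista none (some i) ++ PySem.List.slice lista (some (i+1)) none
          (gerarRotasFuel fuel restante).foldl
            (fun acc p => acc ++ [elemento :: (PySem.List.slice p none (some (-1)) ++ [elemento])])
            permutacoes)
        []

def gerar_rotas (lista : List Int) : List (List Int) := gerarRotasFuel lista.length lista

-- ===== PORT B =====
-- literal transliteration of Source B: an iterative worklist of (prefix, rest) states,
-- expanded once per element, then each complete prefix is closed with its first element.
def gerar_rotas_alt (lista : List Int) : List (List Int) :=
  if lista = [] then []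
  else
    let states := (List.range lista.length).foldl
      (fun states _ =>
        states.flatMap (fun pr =>
          (PySem.List.enumerate pr.2 0).map (fun jx =>
            (pr.1 ++ [jx.2],
             PySem.List.slice pr.2 none (some jx.1) ++ PySem.List.slice pr.2 (some (jx.1 + 1)) none))))
      [(([] : List Int), lista)]
    states.map (fun pr => pr.1 ++ [PySem.List.pyGetD pr.1 0 0])

-- ===== PRECONDITION & SPEC =====
def Spec_gerar_rotas (lista : List Int) (out : List (List Int)) : Prop := out = gerar_rotas_alt lista
instance (lista : List Int) (out : List (List Int)) : Decidable (Spec_gerar_rotas lista out) := by unfold Spec_gerar_rotas; infer_instance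

-- ===== CLAIM (what is proved, stated in full; the proofs are below) =====
def Claim_equal_gerar_rotas : Prop := ∀ (lista : List Int), Dom_gerar_rotas lista → Spec_gerar_rotas lista (gerar_rotas lista)

-- ===== LEMMAS AND PROOFS =====

-- the list with element i removed (lista[:i] + lista[i+1:] for a Nat index)
def remAt (l : List Int) (i : Nat) : List Int := l.take i ++ l.drop (i+1)

-- mathematical form of the enumeration order both programs share: permutations of l
-- in lexicographic-by-original-index order, with fuel = l.length
def permsR : Nat → List Int → List (List Int)
  | 0, _ => [[]]
  | f+1, l => (List.range l.length).flatMap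
      (fun i => (permsR f (remAt l i)).map (fun q => l.getD i 0 :: q))

theorem length_remAt (l : List Int) (i : Nat) (h : i < l.length) :
    (remAt l i).length = l.length - 1 := by
  simp [remAt]; omega

-- A's simplified recursion for length ≥ 2
theorem gerarRotasFuel_step (fuel : Nat) (l : List Int) (h2 : 2 ≤ l.length) :
    gerarRotasFuel (fuel+1) l =
      (List.range l.length).flatMap (fun i =>
        (gerarRotasFuel fuel (remAt l i)).map
          (fun p => l.getD i 0 :: (p.dropLast ++ [l.getD i 0]))) := by
  rw [gerarRotasFuel]
  rw [if_neg (by omega), if_neg (by omega)]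
  rw [PySem.List.pyRange_zero_nat, List.foldl_map]
  have : ∀ (acc : List (List Int)) (k : Nat),
      (fun permutacoes (i : Int) =>
        (gerarRotasFuel fuel
          (PySem.List.slice l none (some i) ++ PySem.List.slice l (some (i+1)) none)).foldl
          (fun acc p => acc ++ [PySem.List.pyGetD l i 0 ::
            (PySem.List.slice p none (some (-1)) ++ [PySem.List.pyGetD l i 0])])
          permutacoes) acc (k : Int)
      = acc ++ (gerarRotasFuel fuel (remAt l k)).map
          (fun p => l.getD k 0 :: (p.dropLast ++ [l.getD k 0])) := by
    intro acc k
    have hcast : (k : Int) + 1 = ((k+1 : Nat) : Int) := by push_cast; ring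
    simp only [hcast, PySem.List.slice_to_natCast, PySem.List.slice_from_natCast,
      PySem.List.pyGetD_natCast, PySem.List.slice_to_neg_one, remAt,
      PySem.List.foldl_append_singleton_eq_map]
  calc (List.range l.length).foldl _ ([] : List (List Int))
      = (List.range l.length).foldl
          (fun acc k => acc ++ (gerarRotasFuel fuel (remAt l k)).map
            (fun p => l.getD k 0 :: (p.dropLast ++ [l.getD k 0]))) [] := by
        apply PySem.List.foldl_congr_mem
        intro acc k _
        exact this acc k
    _ = _ := by rw [PySem.List.foldl_append_eq_flatMap]; simp

-- A computes permsR, each permutation closed by repeating its first element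
theorem gerarRotasFuel_eq (f : Nat) (l : List Int) (hf : l.length = f) (h1 : 1 ≤ f) :
    gerarRotasFuel f l = (permsR f l).map (fun q => q ++ [q.getD 0 0]) := by
  induction f generalizing l with
  | zero => omega
  | succ f ih =>
    by_cases hf1 : l.length = 1
    · -- l = [x]
      obtain ⟨x, rfl⟩ : ∃ x, l = [x] := by
        match l, hf1 with | [x], _ => exact ⟨x, rfl⟩
      have : f = 0 := by omega
      subst this
      rw [gerarRotasFuel]
      simp [permsR, PySem.List.pyGetD_zero_cons]
    · have h2 : 2 ≤ l.length := by omega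
      rw [gerarRotasFuel_step f l h2]
      show _ = (permsR (f+1) l).map _
      rw [permsR, List.map_flatMap]
      apply List.flatMap_congr
      intro i hi
      simp only [List.mem_range] at hi
      have hrem : (remAt l i).length = f := by rw [length_remAt l i hi]; omega
      have hf1' : 1 ≤ f := by omega
      rw [ih (remAt l i) hrem hf1']
      rw [List.map_map, List.map_map]
      apply List.map_congr_left
      intro q hq
      simp

-- one worklist expansion step, in simplified form
def stepB (states : List (List Int × List Int)) : List (List Int × List Int) :=
  states.flatMap (fun pr =>
    (List.range pr.2.length).map (fun j => (pr.1 ++ [pr.2.getD j 0], remAt pr.2 j)))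

-- the transliterated step function (enumerate + slices) is stepB
theorem stepB_eq (states : List (List Int × List Int)) :
    states.flatMap (fun pr =>
      (PySem.List.enumerate pr.2 0).map (fun jx =>
        (pr.1 ++ [jx.2],
         PySem.List.slice pr.2 none (some jx.1) ++ PySem.List.slice pr.2 (some (jx.1 + 1)) none)))
    = stepB states := by
  unfold stepB
  apply List.flatMap_congr
  intro pr _
  rw [PySem.List.enumerate_eq_map_pyRange (d := 0)]
  rw [show PySem.List.len pr.2 = ((pr.2.length : Nat) : Int) from rfl]
  rw [PySem.List.pyRange_zero_nat, List.map_map, List.map_map]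
  apply List.map_congr_left
  intro k _
  have hcast : (k : Int) + 1 = ((k+1 : Nat) : Int) := by push_cast; ring
  simp only [Function.comp, hcast, PySem.List.slice_to_natCast,
    PySem.List.slice_from_natCast, PySem.List.pyGetD_natCast, remAt]

def stepIter : Nat → List (List Int × List Int) → List (List Int × List Int)
  | 0, s => s
  | f+1, s => stepIter f (stepB s)

theorem foldl_range_stepIter (n : Nat) (init : List (List Int × List Int)) :
    (List.range n).foldl (fun s _ => stepB s) init = stepIter n init := by
  induction n generalizing init with
  | zero => rfl
  | succ n ih =>
    rw [List.range_succ_eq_map]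
    simp only [List.foldl_cons, List.foldl_map]
    exact ih (stepB init)

-- invariant: iterating the expansion to exhaustion yields all permutations with empty rests
theorem stepIter_eq (f : Nat) (states : List (List Int × List Int))
    (h : ∀ pr ∈ states, pr.2.length = f) :
    stepIter f states =
      states.flatMap (fun pr => (permsR f pr.2).map (fun q => (pr.1 ++ q, ([] : List Int)))) := by
  induction f generalizing states with
  | zero =>
    rw [stepIter]
    conv_rhs =>
      rw [List.flatMap_congr (g := fun pr => [pr]) (by
        intro pr hpr
        have h2 := h pr hpr
        have : pr.2 = [] := List.eq_nil_of_length_eq_zero h2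
        simp [permsR, Prod.ext_iff, this])]
    simp
  | succ f ih =>
    rw [stepIter]
    rw [ih (stepB states) (by
      intro pr hpr
      simp only [stepB, List.mem_flatMap, List.mem_map, List.mem_range] at hpr
      obtain ⟨pr', hpr', j, hj, rfl⟩ := hpr
      have := h pr' hpr'
      simp only
      rw [length_remAt pr'.2 j (by omega)]; omega)]
    unfold stepB
    rw [List.flatMap_assoc]
    apply List.flatMap_congr
    intro pr hpr
    have hlen := h pr hpr
    rw [permsR, hlen]
    rw [List.map_flatMap, List.flatMap_map]
    apply List.flatMap_congr
    intro j _
    rw [List.map_map]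
    apply List.map_congr_left
    intro q _
    simp

-- B computes the same closed routes
theorem gerar_rotas_alt_eq (l : List Int) (hne : l ≠ []) :
    gerar_rotas_alt l = (permsR l.length l).map (fun q => q ++ [q.getD 0 0]) := by
  unfold gerar_rotas_alt
  rw [if_neg hne]
  have hs : ((List.range l.length).foldl
      (fun states _ =>
        states.flatMap (fun pr =>
          (PySem.List.enumerate pr.2 0).map (fun jx =>
            (pr.1 ++ [jx.2],
             PySem.List.slice pr.2 none (some jx.1) ++ PySem.List.slice pr.2 (some (jx.1 + 1)) none))))
      [(([] : List Int), l)])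
      = (permsR l.length l).map (fun q => (q, ([] : List Int))) := by
    calc (List.range l.length).foldl _ [(([] : List Int), l)]
        = (List.range l.length).foldl (fun s _ => stepB s) [(([] : List Int), l)] := by
          apply PySem.List.foldl_congr_mem
          intro acc _ _
          exact stepB_eq acc
      _ = stepIter l.length [(([] : List Int), l)] := foldl_range_stepIter _ _
      _ = _ := by
          rw [stepIter_eq l.length [(([] : List Int), l)] (by simp)]
          simp
  rw [hs, List.map_map]
  apply List.map_congr_left
  intro q _
  simp [PySem.List.pyGetD_zero]

-- ===== VERDICT (by name: the statement is the Claim_ definition above) =====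
theorem gerar_rotas_spec : Claim_equal_gerar_rotas := by
  intro lista _
  show gerar_rotas lista = gerar_rotas_alt lista
  by_cases h : lista = []
  · subst h; rfl
  · have h1 : 1 ≤ lista.length := by
      cases lista with
      | nil => exact absurd rfl h
      | cons a t => simp
    rw [gerar_rotas, gerarRotasFuel_eq lista.length lista rfl h1,
      gerar_rotas_alt_eq lista h]
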